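-- pv_equiv track=rewrite | github.com/nyuxz/ds1012_final_project | src/prepro.py | iob_np_tag
-- ===== SOURCE A (Python) =====
-- def iob_np_tag(tag_list):
--     '''
--     function for creating iob_np
--     @in: a list of POS tags
--     @out: iob_np tags
--     '''
--     iob_np = ['o_np'] * len(tag_list)
--     for i in range(len(tag_list)):
--         if 'NN' in tag_list[i]:
--             if iob_np[i-1] == 'b_np':
--                 iob_np[i] = 'i_np'
--             elif iob_np[i-1] == 'i_np':
--                 iob_np[i] = 'i_np'
--             else:
--                 iob_np[i] = 'b_np'
--         i +=1
--     return iob_np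
-- ===== SOURCE B (Python) =====
-- def iob_np_tag(tag_list):
--     '''
--     function for creating iob_np
--     @in: a list of POS tags
--     @out: iob_np tags
--     '''
--     out = []
--     n = len(tag_list)
--     i = 0
--     while i < n:
--         if 'NN' in tag_list[i]:
--             # find the end of this maximal run of NN-bearing tags
--             j = i + 1
--             while j < n and 'NN' in tag_list[j]:
--                 j += 1
--             out.append('b_np')
--             out.extend(['i_np'] * (j - i - 1))
--             i = j
--         else:
--             out.append('o_np')
--             i += 1
--     return out
-- ===== Notes on version B (the rewrite author's own statement) =====
-- stated objective: alternative
-- what changed: B segments the input into maximal runs of NN-bearing tags and emits each run as a block ('b_np' followed by a replicated 'i_np' tail), instead of A's per-index pass that mutates a preallocated array and reads back the previously written cell (with a negative-index read at i=0).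
import Mathlib
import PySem

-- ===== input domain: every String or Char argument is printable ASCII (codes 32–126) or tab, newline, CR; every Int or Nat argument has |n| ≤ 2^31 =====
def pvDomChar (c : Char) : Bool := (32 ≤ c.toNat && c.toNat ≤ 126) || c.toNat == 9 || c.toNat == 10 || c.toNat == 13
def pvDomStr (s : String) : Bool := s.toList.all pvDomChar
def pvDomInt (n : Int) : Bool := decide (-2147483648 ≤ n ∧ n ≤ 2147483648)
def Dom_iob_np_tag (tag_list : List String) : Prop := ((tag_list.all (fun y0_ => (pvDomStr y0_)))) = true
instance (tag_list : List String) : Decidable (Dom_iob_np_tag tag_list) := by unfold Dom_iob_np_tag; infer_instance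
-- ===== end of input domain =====

-- B replaces A's mutate-and-read-back array pass with run-length segmentation:
-- it finds each maximal run of NN-bearing tags and emits it as a block
-- ('b_np' then replicated 'i_np'); same O(n) cost, a different decomposition.

-- ===== PORT A =====
-- literal transliteration of A: preallocated 'o_np' array, loop over indices,
-- 'tag_list[i]' and 'iob_np[i-1]' via pyGet? (negative index wraps, as in Python;
-- both indices are always in range here, so .getD "" never supplies the default)
def iob_np_tag (tag_list : List String) : List String :=
  (List.range tag_list.length).foldl
    (fun iob (i : Nat) =>
      if PySem.Str.isIn "NN" ((PySem.List.pyGet? tag_list (i : Int)).getD "") then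
        if (PySem.List.pyGet? iob ((i : Int) - 1)).getD "" == "b_np" then iob.set i "i_np"
        else if (PySem.List.pyGet? iob ((i : Int) - 1)).getD "" == "i_np" then iob.set i "i_np"
        else iob.set i "b_np"
      else iob)
    (List.replicate tag_list.length "o_np")

-- ===== PORT B =====
-- inner while loop of Source B: advance j while j < n and 'NN' in tag_list[j]
def npRunEnd (ts : List String) (j : Nat) : Nat :=
  if h : j < ts.length ∧ PySem.Str.isIn "NN" (ts.getD j "") then npRunEnd ts (j + 1) else j
termination_by ts.length - j
decreasing_by omega

theorem npRunEnd_gt (ts : List String) (j : Nat)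
    (h : j < ts.length ∧ PySem.Str.isIn "NN" (ts.getD j "")) : j < npRunEnd ts j := by
  rw [npRunEnd, dif_pos h]
  have : ∀ k, k ≤ npRunEnd ts k := by
    intro k
    induction k using npRunEnd.induct ts with
    | case1 k hk ih => rw [npRunEnd, dif_pos hk]; omega
    | case2 k hk => rw [npRunEnd, dif_neg hk]
  have := this (j + 1); omega

-- outer while loop of Source B
def npEmit (ts : List String) (i : Nat) : List String :=
  if hi : i < ts.length then
    if hn : PySem.Str.isIn "NN" (ts.getD i "") then
      -- run starts at i; emit 'b_np' then (j - i - 1) copies of 'i_np'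
      "b_np" :: List.replicate (npRunEnd ts (i + 1) - i - 1) "i_np" ++ npEmit ts (npRunEnd ts (i + 1))
    else
      "o_np" :: npEmit ts (i + 1)
  else []
termination_by ts.length - i
decreasing_by
  · have h1 : i + 1 ≤ npRunEnd ts (i + 1) := by
      by_cases h : i + 1 < ts.length ∧ PySem.Str.isIn "NN" (ts.getD (i+1) "")
      · exact Nat.le_of_lt (npRunEnd_gt ts (i+1) h)
      · rw [npRunEnd, dif_neg h]
    have h2 : npRunEnd ts (i + 1) ≤ ts.length := by
      have : ∀ k, k ≤ ts.length → npRunEnd ts k ≤ ts.length := by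
        intro k
        induction k using npRunEnd.induct ts with
        | case1 k hk ih => intro _; rw [npRunEnd, dif_pos hk]; exact ih (by omega)
        | case2 k hk => intro hkl; rw [npRunEnd, dif_neg hk]; exact hkl
      exact this (i + 1) (by omega)
    omega
  · omega

def iob_np_tag_alt (tag_list : List String) : List String := npEmit tag_list 0

-- ===== PRECONDITION & SPEC =====
def Spec_iob_np_tag (tag_list : List String) (out : List String) : Prop := out = iob_np_tag_alt tag_list
instance (tag_list : List String) (out : List String) : Decidable (Spec_iob_np_tag tag_list out) := by unfold Spec_iob_np_tag; infer_instance

-- ===== CLAIM (what is proved, stated in full; the proofs are below) =====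
def Claim_equal_iob_np_tag : Prop := ∀ (tag_list : List String), Dom_iob_np_tag tag_list → Spec_iob_np_tag tag_list (iob_np_tag tag_list)

-- ===== LEMMAS AND PROOFS =====

-- The pointwise description both programs satisfy: the tag at a position from the
-- token and its predecessor only.
def npCell (prev : Option String) (t : String) : String :=
  if !(PySem.Str.isIn "NN" t) then "o_np"
  else if (match prev with | none => true | some p => !(PySem.Str.isIn "NN" p)) then "b_np"
  else "i_np"

def cells (tag_list : List String) : List String :=
  ((none :: tag_list.map some).zip tag_list).map (fun pt => npCell pt.1 pt.2)

theorem cells_length (ts : List String) : (cells ts).length = ts.length := by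
  simp [cells]

theorem cells_get_zero (ts : List String) (h : 0 < ts.length) :
    (cells ts)[0]'(by simpa [cells_length] using h) = npCell none (ts[0]'h) := by
  simp [cells, List.getElem_zip]

theorem cells_get_succ (ts : List String) (k : Nat) (h : k + 1 < ts.length) :
    (cells ts)[k+1]'(by simpa [cells_length] using h) =
      npCell (some (ts[k]'(by omega))) (ts[k+1]'h) := by
  simp [cells, List.getElem_zip]

-- npCell evaluation lemmas
theorem npCell_of_not (prev : Option String) (t : String)
    (h : PySem.Str.isIn "NN" t = false) : npCell prev t = "o_np" := by
  simp only [npCell, PySem.Str.isIn, show "NN".toList = ['N','N'] from rfl] at h ⊢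
  simp [h]

theorem npCell_none (t : String) (h : PySem.Str.isIn "NN" t = true) :
    npCell none t = "b_np" := by
  simp only [npCell, PySem.Str.isIn, show "NN".toList = ['N','N'] from rfl] at h ⊢
  simp [h]

theorem npCell_some (p t : String) (h : PySem.Str.isIn "NN" t = true) :
    npCell (some p) t = if PySem.Str.isIn "NN" p then "i_np" else "b_np" := by
  simp only [npCell, PySem.Str.isIn, show "NN".toList = ['N','N'] from rfl] at h ⊢
  simp [h]
  split <;> simp_all

-- every cell is npCell of some predecessor and its token
theorem cells_cell (ts : List String) (j : Nat) (h : j < ts.length) :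
    ∃ prev, (cells ts)[j]'(by rw [cells_length]; omega) = npCell prev (ts[j]'h) := by
  cases j with
  | zero => exact ⟨none, cells_get_zero ts h⟩
  | succ j => exact ⟨some (ts[j]'(by omega)), cells_get_succ ts j h⟩

-- a cell is a np tag ('b_np' or 'i_np') exactly when its token contains 'NN'
theorem npCell_cases (prev : Option String) (t : String) :
    (PySem.Str.isIn "NN" t = true ∧ (npCell prev t = "b_np" ∨ npCell prev t = "i_np")) ∨
    (PySem.Str.isIn "NN" t = false ∧ npCell prev t = "o_np") := by
  cases h : PySem.Str.isIn "NN" t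
  · exact Or.inr ⟨rfl, npCell_of_not prev t h⟩
  · refine Or.inl ⟨rfl, ?_⟩
    cases prev with
    | none => exact Or.inl (npCell_none t h)
    | some p => rw [npCell_some p t h]; split <;> simp

-- ---------- A = cells (loop invariant on A's array pass) ----------

theorem step_eq (ts : List String) (k : Nat) (hk : k < ts.length) :
    (fun iob (i : Nat) =>
      if PySem.Str.isIn "NN" ((PySem.List.pyGet? ts (i : Int)).getD "") then
        if (PySem.List.pyGet? iob ((i : Int) - 1)).getD "" == "b_np" then iob.set i "i_np"
        else if (PySem.List.pyGet? iob ((i : Int) - 1)).getD "" == "i_np" then iob.set i "i_np"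
        else iob.set i "b_np"
      else iob)
      ((cells ts).take k ++ List.replicate (ts.length - k) "o_np") k
    = (cells ts).take (k + 1) ++ List.replicate (ts.length - (k + 1)) "o_np" := by
  have halt : k < (cells ts).length := by rw [cells_length]; omega
  have hLenTake : ((cells ts).take k).length = k := by
    rw [List.length_take]; omega
  have hTake : (cells ts).take (k + 1) =
      (cells ts).take k ++ [(cells ts)[k]'halt] := by
    rw [List.take_add_one]; simp [List.getElem?_eq_getElem halt]
  have hRep : List.replicate (ts.length - k) "o_np" =
      "o_np" :: List.replicate (ts.length - (k + 1)) "o_np" := by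
    rw [show ts.length - k = (ts.length - (k + 1)) + 1 by omega, List.replicate_succ]
  have hSet : ∀ v : String,
      ((cells ts).take k ++ List.replicate (ts.length - k) "o_np").set k v =
      (cells ts).take k ++ v :: List.replicate (ts.length - (k + 1)) "o_np" := by
    intro v
    rw [List.set_append_right _ _ (by omega), hLenTake, Nat.sub_self, hRep, List.set_cons_zero]
  simp only
  rw [PySem.List.pyGet?_natCast, List.getElem?_eq_getElem hk, Option.getD_some]
  cases hNN : PySem.Str.isIn "NN" (ts[k]'hk) with
  | false =>
    simp only [Bool.false_eq_true, if_false]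
    obtain ⟨pv, hpv⟩ := cells_cell ts k hk
    rw [hTake, hpv, npCell_of_not pv _ hNN, List.append_assoc, List.singleton_append, ← hRep]
  | true =>
    simp only [if_true]
    cases k with
    | zero =>
      have hprev : PySem.List.pyGet? ((cells ts).take 0 ++
          List.replicate (ts.length - 0) "o_np") ((0 : Nat) - 1 : Int) = some "o_np" := by
        simp only [List.take_zero, List.nil_append, Nat.sub_zero]
        rw [show ((0 : Nat) : Int) - 1 = -1 by rfl, PySem.List.pyGet?_neg_one]
        rw [show ts.length = (ts.length - 1) + 1 by omega, List.replicate_succ']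
        simp
      rw [hprev, Option.getD_some]
      simp only [show (("o_np" == "b_np") = false) from rfl,
        show (("o_np" == "i_np") = false) from rfl, Bool.false_eq_true, if_false]
      rw [hSet, hTake, cells_get_zero ts hk, npCell_none _ hNN]
      simp
    | succ j =>
      have hj : j < ts.length := by omega
      have hidx : ((j + 1 : Nat) : Int) - 1 = ((j : Nat) : Int) := by push_cast; ring
      have hprev : PySem.List.pyGet? ((cells ts).take (j + 1) ++
          List.replicate (ts.length - (j + 1)) "o_np") (((j + 1 : Nat) : Int) - 1) =
          some ((cells ts)[j]'(by rw [cells_length]; omega)) := by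
        rw [hidx, PySem.List.pyGet?_natCast, List.getElem?_append_left (by omega),
          List.getElem?_take_of_lt (by omega),
          List.getElem?_eq_getElem (by rw [cells_length]; omega)]
      obtain ⟨pv, hpv⟩ := cells_cell ts j hj
      rcases npCell_cases pv (ts[j]'hj) with ⟨hjNN, hbi⟩ | ⟨hjNN, ho⟩
      · have : ((cells ts)[j]'(by rw [cells_length]; omega) == "b_np") = true ∨
            ((cells ts)[j]'(by rw [cells_length]; omega) == "i_np") = true := by
          rw [hpv]; rcases hbi with h | h <;> [left; right] <;> simp [h]
        rw [hprev, Option.getD_some]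
        have hres : (if ((cells ts)[j]'(by rw [cells_length]; omega) == "b_np") = true
            then ((cells ts).take (j+1) ++ List.replicate (ts.length - (j+1)) "o_np").set (j+1) "i_np"
            else if ((cells ts)[j]'(by rw [cells_length]; omega) == "i_np") = true
            then ((cells ts).take (j+1) ++ List.replicate (ts.length - (j+1)) "o_np").set (j+1) "i_np"
            else ((cells ts).take (j+1) ++ List.replicate (ts.length - (j+1)) "o_np").set (j+1) "b_np")
            = ((cells ts).take (j+1) ++ List.replicate (ts.length - (j+1)) "o_np").set (j+1) "i_np" := by
          rcases this with h | h <;> simp [h]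
        rw [hres, hSet, hTake, cells_get_succ ts j hk, npCell_some _ _ hNN, hjNN, if_pos rfl]
        simp
      · rw [hprev, Option.getD_some, hpv, ho]
        simp only [show (("o_np" == "b_np") = false) from rfl,
          show (("o_np" == "i_np") = false) from rfl, Bool.false_eq_true, if_false]
        rw [hSet, hTake, cells_get_succ ts j hk, npCell_some _ _ hNN, hjNN, if_neg (by simp)]
        simp

theorem loop_inv (ts : List String) (k : Nat) (hk : k ≤ ts.length) :
    (List.range k).foldl
      (fun iob (i : Nat) =>
        if PySem.Str.isIn "NN" ((PySem.List.pyGet? ts (i : Int)).getD "") then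
          if (PySem.List.pyGet? iob ((i : Int) - 1)).getD "" == "b_np" then iob.set i "i_np"
          else if (PySem.List.pyGet? iob ((i : Int) - 1)).getD "" == "i_np" then iob.set i "i_np"
          else iob.set i "b_np"
        else iob)
      (List.replicate ts.length "o_np")
    = (cells ts).take k ++ List.replicate (ts.length - k) "o_np" := by
  induction k with
  | zero => simp
  | succ k ih =>
    rw [List.range_succ, List.foldl_append, ih (by omega)]
    simpa using step_eq ts k (by omega)

theorem a_eq_cells (ts : List String) : iob_np_tag ts = cells ts := by
  unfold iob_np_tag
  rw [loop_inv ts ts.length (le_refl _)]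
  simp [cells_length]

-- ---------- B = cells (run structure of npEmit) ----------

theorem npRunEnd_ge (ts : List String) (j : Nat) : j ≤ npRunEnd ts j := by
  induction j using npRunEnd.induct ts with
  | case1 k hk ih => rw [npRunEnd, dif_pos hk]; omega
  | case2 k hk => rw [npRunEnd, dif_neg hk]

theorem npRunEnd_le (ts : List String) (j : Nat) (h : j ≤ ts.length) :
    npRunEnd ts j ≤ ts.length := by
  induction j using npRunEnd.induct ts with
  | case1 k hk ih => rw [npRunEnd, dif_pos hk]; exact ih (by omega)
  | case2 k hk => rw [npRunEnd, dif_neg hk]; exact h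

-- the stop condition fails at the run end
theorem npRunEnd_stop (ts : List String) (j : Nat) :
    ¬ (npRunEnd ts j < ts.length ∧ PySem.Str.isIn "NN" (ts.getD (npRunEnd ts j) "")) := by
  induction j using npRunEnd.induct ts with
  | case1 k hk ih => rw [npRunEnd, dif_pos hk]; exact ih
  | case2 k hk => rw [npRunEnd, dif_neg hk]; exact hk

-- every index in [j, npRunEnd ts j) is inside the run
theorem npRunEnd_run (ts : List String) (j k : Nat) (h1 : j ≤ k) (h2 : k < npRunEnd ts j) :
    k < ts.length ∧ PySem.Str.isIn "NN" (ts.getD k "") := by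
  induction j using npRunEnd.induct ts with
  | case1 m hm ih =>
    rw [npRunEnd, dif_pos hm] at h2
    rcases Nat.eq_or_lt_of_le h1 with rfl | hlt
    · exact hm
    · exact ih (by omega) h2
  | case2 m hm =>
    rw [npRunEnd, dif_neg hm] at h2
    omega

theorem getD_eq_getElem (ts : List String) (k : Nat) (h : k < ts.length) :
    ts.getD k "" = ts[k]'h := by
  simp [List.getD, List.getElem?_eq_getElem h]

-- the middle of a run is all 'i_np' in cells
theorem run_cells (ts : List String) (i : Nat) (hi : i < ts.length)
    (hNN : PySem.Str.isIn "NN" (ts.getD i "")) :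
    ∀ k, i < k → k ≤ npRunEnd ts (i + 1) →
      (cells ts).drop k = List.replicate (npRunEnd ts (i + 1) - k) "i_np" ++
        (cells ts).drop (npRunEnd ts (i + 1)) := by
  intro k hk1 hk2
  have hle : npRunEnd ts (i + 1) ≤ ts.length := npRunEnd_le ts (i + 1) (by omega)
  induction hd : npRunEnd ts (i + 1) - k generalizing k with
  | zero =>
    have : k = npRunEnd ts (i + 1) := by omega
    subst this; simp
  | succ m ih =>
    have hkl : k < npRunEnd ts (i + 1) := by omega
    have hkn : k < ts.length ∧ PySem.Str.isIn "NN" (ts.getD k "") :=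
      npRunEnd_run ts (i + 1) k (by omega) hkl
    have hkc : k < (cells ts).length := by rw [cells_length]; exact hkn.1
    have hdrop : (cells ts).drop k = (cells ts)[k]'hkc :: (cells ts).drop (k + 1) :=
      List.drop_eq_getElem_cons hkc
    -- the cell at k is 'i_np': its token and its predecessor both contain 'NN'
    have hprev : k - 1 < ts.length ∧ PySem.Str.isIn "NN" (ts.getD (k-1) "") := by
      rcases Nat.eq_or_lt_of_le hk1 with h | h
    -- predecessor is i itself (run head) or inside the run
      · refine ⟨by omega, ?_⟩; rw [show k - 1 = i by omega]; exact hNN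
      · exact npRunEnd_run ts (i + 1) (k - 1) (by omega) (by omega)
    obtain ⟨k', rfl⟩ : ∃ k', k = k' + 1 := ⟨k - 1, by omega⟩
    have hcell : (cells ts)[k'+1]'hkc = "i_np" := by
      rw [cells_get_succ ts k' hkn.1, npCell_some _ _ (by rw [← getD_eq_getElem ts _ hkn.1]; exact hkn.2)]
      rw [if_pos]
      rw [← getD_eq_getElem ts k' (by omega)]
      simpa using hprev.2
    rw [hdrop, hcell, ih (k' + 2) (by omega) (by omega) (by omega)]
    simp [List.replicate_succ]

theorem npEmit_eq (ts : List String) (i : Nat) :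
    (∀ h : i < ts.length, PySem.Str.isIn "NN" (ts.getD i "") →
      i = 0 ∨ ∀ h' : i - 1 < ts.length, PySem.Str.isIn "NN" (ts.getD (i-1) "") = false) →
    npEmit ts i = (cells ts).drop i := by
  induction i using npEmit.induct ts with
  | case1 i hil hNN ih =>
    intro hpred
    have hic : i < (cells ts).length := by rw [cells_length]; exact hil
    have hdrop : (cells ts).drop i = (cells ts)[i]'hic :: (cells ts).drop (i + 1) :=
      List.drop_eq_getElem_cons hic
    rw [npEmit, dif_pos hil, dif_pos hNN]
    set j := npRunEnd ts (i + 1) with hj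
    have hjge : i + 1 ≤ j := npRunEnd_ge ts (i + 1)
    have hjle : j ≤ ts.length := npRunEnd_le ts (i + 1) (by omega)
    -- head cell is 'b_np'
    have hcell : (cells ts)[i]'hic = "b_np" := by
      cases i with
      | zero =>
        rw [cells_get_zero ts hil,
          npCell_none _ (by rw [← getD_eq_getElem ts _ hil]; exact hNN)]
      | succ i' =>
        rcases hpred hil hNN with h0 | hno
        · omega
        · rw [cells_get_succ ts i' hil,
            npCell_some _ _ (by rw [← getD_eq_getElem ts _ hil]; exact hNN), if_neg]
          have := hno (by omega)
          rw [show i' + 1 - 1 = i' by omega] at this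
          rw [← getD_eq_getElem ts i' (by omega), this]
          exact Bool.false_ne_true
    have hrec : npEmit ts j = (cells ts).drop j := by
      apply ih
      intro hjl hjNN
      exact absurd ⟨hjl, hjNN⟩ (npRunEnd_stop ts (i + 1))
    rw [hdrop, hcell, hrec, run_cells ts i hil hNN (i + 1) (by omega) hjge]
    simp [Nat.sub_sub, hj]
  | case2 i hil hNN ih =>
    intro _
    have hic : i < (cells ts).length := by rw [cells_length]; exact hil
    have hdrop : (cells ts).drop i = (cells ts)[i]'hic :: (cells ts).drop (i + 1) :=
      List.drop_eq_getElem_cons hic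
    rw [npEmit, dif_pos hil, dif_neg hNN]
    have hcell : (cells ts)[i]'hic = "o_np" := by
      obtain ⟨pv, hpv⟩ := cells_cell ts i hil
      rw [hpv, npCell_of_not _ _ (by rw [← getD_eq_getElem ts _ hil]; simpa using hNN)]
    rw [hdrop, hcell, ih ?_]
    intro h _
    right; intro h'
    simpa using hNN
  | case3 i hil =>
    intro _
    rw [npEmit, dif_neg hil]
    exact (List.drop_eq_nil_of_le (by rw [cells_length]; omega)).symm

theorem b_eq_cells (ts : List String) : iob_np_tag_alt ts = cells ts := by
  unfold iob_np_tag_alt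
  rw [npEmit_eq ts 0 (by intro _ _; exact Or.inl rfl)]
  simp

-- ===== VERDICT (by name: the statement is the Claim_ definition above) =====
theorem iob_np_tag_spec : Claim_equal_iob_np_tag := by
  intro ts _
  unfold Spec_iob_np_tag
  rw [a_eq_cells, b_eq_cells]
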